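-- pv_equiv track=rewrite | github.com/atriumn/noxaudit | noxaudit/pricing.py | get_frame_label
-- ===== SOURCE A (Python) =====
-- FOCUS_FRAMES: dict[str, str] = {
--     "security": "Does it work?",
--     "testing": "Does it work?",
--     "patterns": "Does it last?",
--     "hygiene": "Does it last?",
--     "docs": "Does it last?",
--     "dependencies": "Does it last?",
--     "performance": "Does it scale?",
-- }
--
-- def get_frame_label(focus_names: list[str]) -> str | None:
--     """Return shared frame label if all focus areas belong to the same frame."""
--     if not focus_names:
--         return None
--     frames = {FOCUS_FRAMES.get(name) for name in focus_names if name in FOCUS_FRAMES}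
--     frames.discard(None)  # type: ignore[arg-type]
--     if len(frames) == 1:
--         return next(iter(frames))
--     return None
-- ===== SOURCE B (Python) =====
-- FOCUS_FRAMES: dict[str, str] = {
--     "security": "Does it work?",
--     "testing": "Does it work?",
--     "patterns": "Does it last?",
--     "hygiene": "Does it last?",
--     "docs": "Does it last?",
--     "dependencies": "Does it last?",
--     "performance": "Does it scale?",
-- }
--
-- def get_frame_label(focus_names: list[str]) -> str | None:
--     """Return shared frame label if all focus areas belong to the same frame."""
--     result = None
--     for name in focus_names:
--         label = FOCUS_FRAMES.get(name)
--         if label is None: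
--             continue
--         if result is None:
--             result = label
--         elif label != result:
--             return None
--     return result
-- ===== Notes on version B (the rewrite author's own statement) =====
-- stated objective: simpler
-- what changed: Replaces the set comprehension + discard + len check with a single pass keeping one scalar 'result' (None sentinel) and an early return on the first frame mismatch; no set is built.
import Mathlib
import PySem

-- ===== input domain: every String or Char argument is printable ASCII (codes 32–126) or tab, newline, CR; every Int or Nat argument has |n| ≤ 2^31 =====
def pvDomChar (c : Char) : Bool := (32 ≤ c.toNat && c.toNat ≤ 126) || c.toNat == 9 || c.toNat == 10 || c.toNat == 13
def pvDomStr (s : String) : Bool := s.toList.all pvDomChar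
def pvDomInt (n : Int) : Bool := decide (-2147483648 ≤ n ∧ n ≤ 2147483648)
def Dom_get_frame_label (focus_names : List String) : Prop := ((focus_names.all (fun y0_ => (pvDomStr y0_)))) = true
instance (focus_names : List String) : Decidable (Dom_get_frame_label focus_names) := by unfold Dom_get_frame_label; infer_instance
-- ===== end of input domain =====

-- B replaces A's set comprehension + len check by a single pass with one scalar accumulator
-- and an early return on the first mismatch (objective: simpler).

-- ===== PORT A =====
def FOCUS_FRAMES : PySem.Dict String String := PySem.Dict.ofList
  [("security", "Does it work?"), ("testing", "Does it work?"),
   ("patterns", "Does it last?"), ("hygiene", "Does it last?"),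
   ("docs", "Does it last?"), ("dependencies", "Does it last?"),
   ("performance", "Does it scale?")]

-- {FOCUS_FRAMES.get(name) for name in focus_names if name in FOCUS_FRAMES}
def framesSet (focus_names : List String) : PySem.Set (Option String) :=
  focus_names.foldl
    (fun s name => if FOCUS_FRAMES.contains name then PySem.Set.add s (FOCUS_FRAMES.get? name) else s)
    PySem.Set.empty

def get_frame_label (focus_names : List String) : Option String :=
  if focus_names = [] then none
  else
    let frames := PySem.Set.discard (framesSet focus_names) none   -- frames.discard(None)
    if PySem.Set.len frames = 1 then
      frames.head?.getD none   -- next(iter(frames)) on a 1-element set: its unique element (order-independent)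
    else none

-- ===== PORT B =====
-- the for-loop of Source B, with its early 'return None' on a mismatch
def gflLoop : List String → Option String → Option String
  | [], result => result
  | name :: rest, result =>
    match FOCUS_FRAMES.get? name with       -- label = FOCUS_FRAMES.get(name)
    | none => gflLoop rest result           -- continue
    | some label =>
      match result with
      | none => gflLoop rest (some label)   -- result = label
      | some r => if label = r then gflLoop rest result else none

def get_frame_label_alt (focus_names : List String) : Option String :=
  gflLoop focus_names none

-- ===== PRECONDITION & SPEC =====
def Spec_get_frame_label (focus_names : List String) (out : Option String) : Prop := out = get_frame_label_alt focus_names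
instance (focus_names : List String) (out : Option String) : Decidable (Spec_get_frame_label focus_names out) := by unfold Spec_get_frame_label; infer_instance

-- ===== CLAIM (what is proved, stated in full; the proofs are below) =====
def Claim_equal_get_frame_label : Prop := ∀ (focus_names : List String), Dom_get_frame_label focus_names → Spec_get_frame_label focus_names (get_frame_label focus_names)

-- ===== LEMMAS AND PROOFS =====

-- the loop body of A's set comprehension
def fStep (s : PySem.Set (Option String)) (name : String) : PySem.Set (Option String) :=
  if FOCUS_FRAMES.contains name then PySem.Set.add s (FOCUS_FRAMES.get? name) else s

theorem framesSet_eq_foldl (ns : List String) : framesSet ns = ns.foldl fStep [] := rfl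

-- A's finishing step applied to an accumulated set
def aFin (t : PySem.Set (Option String)) : Option String :=
  let u := PySem.Set.discard t none
  if PySem.Set.len u = 1 then u.head?.getD none else none

theorem none_not_mem_fStep (s : PySem.Set (Option String)) (n : String)
    (h : none ∉ s) : none ∉ fStep s n := by
  unfold fStep
  split
  · next hc =>
    intro hm
    rcases (PySem.Set.mem_add _ _ _).1 hm with h1 | h2
    · exact h h1
    · have := (PySem.Dict.get?_eq_none_iff_contains FOCUS_FRAMES n).1 h2.symm
      simp [hc] at this
  · exact h

theorem length_le_fStep (s : PySem.Set (Option String)) (n : String) :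
    s.length ≤ (fStep s n).length := by
  unfold fStep
  split
  · rw [PySem.Set.add_eq_ite]
    split
    · exact le_refl _
    · simp
  · exact le_refl _

-- once two distinct labels are in the set, A's answer is none
theorem aFin_foldl_big (ns : List String) :
    ∀ (s : PySem.Set (Option String)), 2 ≤ s.length → none ∉ s →
      aFin (ns.foldl fStep s) = none := by
  induction ns with
  | nil =>
    intro s h2 hn
    unfold aFin
    have : PySem.Set.discard s none = s := by
      unfold PySem.Set.discard
      apply List.filter_eq_self.2
      intro a ha
      cases a with
      | none => exact absurd ha hn
      | some x => simp
    simp only [List.foldl_nil, this, PySem.Set.len]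
    have : s.length ≠ 1 := by omega
    simp [this]
  | cons n rest ih =>
    intro s h2 hn
    simp only [List.foldl_cons]
    exact ih _ (le_trans h2 (length_le_fStep s n)) (none_not_mem_fStep s n hn)

-- main invariant: A's fold finished with aFin agrees with B's loop
theorem main_inv (ns : List String) :
    ∀ (r : Option String),
      aFin (ns.foldl fStep (match r with | none => [] | some x => [some x])) = gflLoop ns r := by
  induction ns with
  | nil =>
    intro r
    cases r with
    | none => rfl
    | some x => rfl
  | cons n rest ih =>
    intro r
    simp only [List.foldl_cons, gflLoop]
    rcases hg : FOCUS_FRAMES.get? n with _ | label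
    · have hc : FOCUS_FRAMES.contains n = false :=
        (PySem.Dict.get?_eq_none_iff_contains _ _).1 hg
      simp only [fStep, hc, Bool.false_eq_true, if_false]
      exact ih r
    · have hc : FOCUS_FRAMES.contains n = true := by
        by_contra hcf
        have := (PySem.Dict.get?_eq_none_iff_contains FOCUS_FRAMES n).2
          (by simpa using hcf)
        rw [this] at hg; cases hg
      cases r with
      | none =>
        have : fStep [] n = [some label] := by
          simp [fStep, hc, hg]
        rw [this]
        exact ih (some label)
      | some x =>
        by_cases hlx : label = x
        · subst hlx
          have : fStep [some label] n = [some label] := by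
            simp [fStep, hc, hg]
          rw [this]
          simpa using ih (some label)
        · have : fStep [some x] n = [some x, some label] := by
            simp [fStep, hc, hg, hlx]
          rw [this]
          simp only [if_neg hlx]
          exact aFin_foldl_big rest [some x, some label] (by simp) (by simp)

-- ===== VERDICT (by name: the statement is the Claim_ definition above) =====
theorem get_frame_label_spec : Claim_equal_get_frame_label := by
  intro focus_names _
  unfold Spec_get_frame_label get_frame_label get_frame_label_alt
  by_cases h : focus_names = []
  · subst h; rfl
  · simp only [if_neg h]
    have := main_inv focus_names none
    simpa [aFin, framesSet_eq_foldl] using this
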